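-- pv_equiv track=rewrite | github.com/Vontk/Prog | Testing/Parcial_2.py | count_first_characters
-- ===== SOURCE A (Python) =====
-- def count_first_characters(map):
--     output_map = dict()
--     first_characters = list()
--     abc = ['a', 'b', 'c', 'd', 'e', 'f', 'g', 'h', 'i', 'j', 'k', 'l', 'm', 'n', 'ñ' 'o', 'p', 'q', 'r', 's', 't', 'u',
--            'v', 'w', 'x', 'y', 'z']
--     for lists in map.values():
--         for strings in lists:
--             first_characters.append(strings[0])
--     for character in abc:
--         if character in first_characters:
--             output_map[character] = 0
--             for element in first_characters:
--                 if element.lower() == character: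
--                     output_map[character] += 1
--     return output_map
-- ===== SOURCE B (Python) =====
-- def count_first_characters(map):
--     abc = ['a', 'b', 'c', 'd', 'e', 'f', 'g', 'h', 'i', 'j', 'k', 'l', 'm', 'n', 'ñ' 'o', 'p', 'q', 'r', 's', 't', 'u',
--            'v', 'w', 'x', 'y', 'z']
--     first_characters = [s[0] for lists in map.values() for s in lists]
--     present = set(first_characters)
--     counts = {}
--     for c in first_characters:
--         k = c.lower()
--         counts[k] = counts.get(k, 0) + 1
--     return {ch: counts.get(ch, 0) for ch in abc if ch in present}
-- ===== Notes on version B (the rewrite author's own statement) =====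
-- stated objective: faster
-- what changed: Replaces A's per-alphabet-letter rescans (a membership scan plus a full counting pass for each of the 26 entries) with one pass that builds a set of present first characters and a dict counter of lowercased first characters, then a single lookup pass over the alphabet.
import Mathlib
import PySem

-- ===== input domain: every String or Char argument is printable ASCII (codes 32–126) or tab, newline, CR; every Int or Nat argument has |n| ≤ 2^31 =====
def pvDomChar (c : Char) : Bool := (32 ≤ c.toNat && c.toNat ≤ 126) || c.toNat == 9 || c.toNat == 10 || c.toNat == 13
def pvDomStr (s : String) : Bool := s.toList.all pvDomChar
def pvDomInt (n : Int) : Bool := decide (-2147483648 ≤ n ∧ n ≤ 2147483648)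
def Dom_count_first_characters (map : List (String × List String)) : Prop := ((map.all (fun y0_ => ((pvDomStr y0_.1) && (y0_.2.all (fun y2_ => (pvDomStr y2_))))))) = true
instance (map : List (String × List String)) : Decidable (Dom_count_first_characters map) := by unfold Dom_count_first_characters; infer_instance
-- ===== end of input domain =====

-- B replaces A's 26 membership-rescans (each with a full counting pass) by one counting pass
-- into a dict plus a single lookup pass over the alphabet (objective: faster, constant/asymptotic
-- per-alphabet-letter mechanism); equivalence of RETURN values is what is proved.

-- shared primitive: Python's s[0] (a one-character string); exact on Pre_ (nonempty strings);
-- the "" default is never reached inside Pre_ (empty strings raise IndexError and are excluded).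
def pvFirst (s : String) : String := ((PySem.Str.pyGet? s 0).map Char.toString).getD ""

def pvAbc : List String :=
  ["a","b","c","d","e","f","g","h","i","j","k","l","m","n","ño","p","q","r","s","t","u",
   "v","w","x","y","z"]

-- ===== PORT A =====
-- A's first_characters variable (the two nested append loops)
def pvFcA (map : List (String × List String)) : List String :=
  map.foldl (fun fc p => p.2.foldl (fun fc s => fc ++ [pvFirst s]) fc) []

def count_first_characters (map : List (String × List String)) : List (String × Int) :=
  (pvAbc.foldl (fun d ch =>
      if (pvFcA map).contains ch then
        (pvFcA map).foldl (fun d e =>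
          if PySem.Str.lower e == ch then PySem.Dict.modify d ch 0 (· + 1) else d)
          (d.insert ch 0)
      else d) PySem.Dict.empty).items

-- ===== PORT B =====
-- B's first_characters comprehension
def pvFcB (map : List (String × List String)) : List String :=
  (map.map Prod.snd).flatMap (fun ls => ls.map pvFirst)

-- B's counting loop (counter of lowered first characters)
def pvCounts (fc : List String) : PySem.Dict String Int :=
  fc.foldl (fun d c =>
    let k := PySem.Str.lower c
    d.insert k (d.getD k 0 + 1)) PySem.Dict.empty

def count_first_characters_alt (map : List (String × List String)) : List (String × Int) :=
  (pvAbc.filter (fun ch => PySem.Set.contains (PySem.Set.ofList (pvFcB map)) ch)).map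
    (fun ch => (ch, (pvCounts (pvFcB map)).getD ch 0))

-- ===== PRECONDITION & SPEC =====
-- Pre_ excludes maps containing an empty string, on which Python A raises IndexError (s[0]).
def Pre_count_first_characters (map : List (String × List String)) : Prop :=
  ∀ p ∈ map, ∀ s ∈ p.2, s ≠ ""
instance (map : List (String × List String)) : Decidable (Pre_count_first_characters map) := by
  unfold Pre_count_first_characters; infer_instance

def pvWitness_count_first_characters : (List (String × List String)) :=
  [("fruits", ["apple", "Ant", "banana"]), ("other", ["zebra"])]

def Spec_count_first_characters (map : List (String × List String)) (out : List (String × Int)) : Prop := out = count_first_characters_alt map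
instance (map : List (String × List String)) (out : List (String × Int)) : Decidable (Spec_count_first_characters map out) := by unfold Spec_count_first_characters; infer_instance

-- ===== CLAIM (what is proved, stated in full; the proofs are below) =====
def Claim_equal_count_first_characters : Prop := ∀ (map : List (String × List String)), Dom_count_first_characters map → Pre_count_first_characters map → Spec_count_first_characters map (count_first_characters map)

-- ===== LEMMAS AND PROOFS =====

-- the two ways of building the first-character list agree
theorem pv_fc_eq (map : List (String × List String)) : pvFcA map = pvFcB map := by
  unfold pvFcA pvFcB
  simp only [PySem.List.foldl_append_singleton_eq_map]
  rw [PySem.List.foldl_append_eq_flatMap (fun p => p.2.map pvFirst) map []]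
  simp [List.flatMap_map]

-- inserting a fresh key appends it
theorem pv_insert_fresh (l : List (String × Int)) (ch : String) (v : Int)
    (h : ∀ q ∈ l, q.1 ≠ ch) :
    PySem.Dict.insert ⟨l⟩ ch v = (⟨l ++ [(ch, v)]⟩ : PySem.Dict String Int) := by
  have hc : (PySem.Dict.contains (⟨l⟩ : PySem.Dict String Int) ch) = false := by
    simp [PySem.Dict.contains, List.any_eq_false]
    intro a b hab
    exact h (a, b) hab
  simp [PySem.Dict.insert, hc]

-- modifying the freshly appended key rewrites only its value
theorem pv_modify_last (l : List (String × Int)) (ch : String) (v : Int) (f : Int → Int)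
    (h : ∀ q ∈ l, q.1 ≠ ch) :
    PySem.Dict.modify (⟨l ++ [(ch, v)]⟩ : PySem.Dict String Int) ch 0 f
      = ⟨l ++ [(ch, f v)]⟩ := by
  have hfind : List.find? (fun p => p.1 == ch) l = none := by
    apply List.find?_eq_none.mpr
    intro q hq
    simp [h q hq]
  have hget : PySem.Dict.getD (⟨l ++ [(ch, v)]⟩ : PySem.Dict String Int) ch 0 = v := by
    simp [PySem.Dict.getD, PySem.Dict.get?, List.find?_append, hfind]
  have hc : PySem.Dict.contains (⟨l ++ [(ch, v)]⟩ : PySem.Dict String Int) ch = true := by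
    simp [PySem.Dict.contains]
  have h1 : List.map (fun p => if p.1 = ch then (ch, f v) else p) l = l := by
    conv_rhs => rw [← List.map_id l]
    apply List.map_congr_left
    intro q hq
    simp [h q hq]
  simp [PySem.Dict.modify, hget, PySem.Dict.insert, hc, h1]

-- A's inner counting loop over a dict ending in the fresh key (ch, v)
theorem pv_inner (fc : List String) (ch : String) (l : List (String × Int)) (v : Int)
    (h : ∀ q ∈ l, q.1 ≠ ch) :
    fc.foldl (fun d e =>
        if PySem.Str.lower e == ch then PySem.Dict.modify d ch 0 (· + 1) else d)
      (⟨l ++ [(ch, v)]⟩ : PySem.Dict String Int)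
      = ⟨l ++ [(ch, v + ((fc.filter (fun e => PySem.Str.lower e == ch)).length : Int))]⟩ := by
  induction fc generalizing v with
  | nil => simp
  | cons e fc ih =>
    by_cases he : PySem.Str.lower e == ch
    · simp only [List.foldl_cons, he, if_true, pv_modify_last l ch v _ h, ih (v + 1),
        List.filter_cons, List.length_cons]
      have harith : v + 1 + ((fc.filter (fun e => PySem.Str.lower e == ch)).length : Int)
          = v + (((fc.filter (fun e => PySem.Str.lower e == ch)).length : Nat) + 1 : Nat) := by
        push_cast; ring
      rw [harith]
    · simp only [List.foldl_cons, he]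
      simp only [Bool.false_eq_true, if_false, ih v, List.filter_cons, he]

-- A's outer loop builds exactly the filtered, counted alphabet list
theorem pv_outer (fc : List String) (l : List String) (hnd : l.Nodup)
    (d : List (String × Int)) (hd : ∀ q ∈ d, q.1 ∉ l) :
    (l.foldl (fun d ch =>
        if fc.contains ch then
          fc.foldl (fun d e =>
            if PySem.Str.lower e == ch then PySem.Dict.modify d ch 0 (· + 1) else d)
            (d.insert ch 0)
        else d) (⟨d⟩ : PySem.Dict String Int)).items
      = d ++ (l.filter (fun ch => fc.contains ch)).map
          (fun ch => (ch, ((fc.filter (fun e => PySem.Str.lower e == ch)).length : Int))) := by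
  induction l generalizing d with
  | nil => simp
  | cons ch l ih =>
    have hch : ∀ q ∈ d, q.1 ≠ ch := fun q hq => by
      have := hd q hq; simp at this; exact this.1
    have hnd' : l.Nodup := (List.nodup_cons.mp hnd).2
    have hchl : ch ∉ l := (List.nodup_cons.mp hnd).1
    by_cases hc : fc.contains ch
    · simp only [List.foldl_cons, hc, if_true, pv_insert_fresh d ch 0 hch,
        pv_inner fc ch d 0 hch, zero_add]
      rw [ih hnd' (d ++ [(ch, ((fc.filter (fun e => PySem.Str.lower e == ch)).length : Int))])
        (by
          intro q hq
          rcases List.mem_append.mp hq with hq | hq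
          · exact fun hl => (hd q hq) (List.mem_cons_of_mem _ hl)
          · simp at hq
            intro hl
            apply hchl
            have hq1 : q.1 = ch := by rw [hq]
            rwa [hq1] at hl)]
      simp [show ch ∈ fc from by simpa using hc]
    · simp only [List.foldl_cons, hc, Bool.false_eq_true, if_false]
      rw [ih hnd' d (fun q hq hl => (hd q hq) (List.mem_cons_of_mem _ hl))]
      simp [show ch ∉ fc from by simpa using hc]

-- B's counter lookup is the count of lowered first characters
theorem pv_counts (fc : List String) (ch : String) :
    (pvCounts fc).getD ch 0 = ((fc.map PySem.Str.lower).count ch : Int) := by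
  unfold pvCounts
  rw [← List.foldl_map (f := PySem.Str.lower)
      (g := fun d (k : String) => PySem.Dict.insert d k (PySem.Dict.getD d k 0 + 1))]
  rw [PySem.Dict.getD_foldl_insert_add_one]
  simp [PySem.Dict.getD, PySem.Dict.get?, PySem.Dict.empty]

-- the count of lowered characters is the length of A's inner filter
theorem pv_count_filter (fc : List String) (ch : String) :
    ((fc.map PySem.Str.lower).count ch : Int)
      = ((fc.filter (fun e => PySem.Str.lower e == ch)).length : Int) := by
  rw [List.count_eq_countP, List.countP_map, ← List.countP_eq_length_filter]
  rfl

-- membership in the deduplicated set agrees with raw list membership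
theorem pv_present (fc : List String) (ch : String) :
    PySem.Set.contains (PySem.Set.ofList fc) ch = fc.contains ch := by
  simp only [PySem.Set.contains]
  by_cases h : ch ∈ fc
  · simp [PySem.Set.mem_ofList, h]
  · simp [PySem.Set.mem_ofList, h]

-- ===== VERDICT (by name: the statement is the Claim_ definition above) =====
theorem count_first_characters_spec : Claim_equal_count_first_characters := by
  intro map _ _
  unfold Spec_count_first_characters count_first_characters count_first_characters_alt
  rw [pv_fc_eq]
  rw [show PySem.Dict.empty = (⟨[]⟩ : PySem.Dict String Int) from rfl]
  rw [pv_outer (pvFcB map) pvAbc (by decide) [] (by simp)]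
  simp only [List.nil_append]
  have hfilter : pvAbc.filter (fun ch => (pvFcB map).contains ch)
      = pvAbc.filter (fun ch => PySem.Set.contains (PySem.Set.ofList (pvFcB map)) ch) := by
    apply List.filter_congr
    intro ch _
    rw [pv_present]
  rw [hfilter]
  apply List.map_congr_left
  intro ch _
  rw [pv_counts, pv_count_filter]
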